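-- pv_equiv track=rewrite | github.com/sergiqz/Final-Compiladores | main.py | getMarks
-- ===== SOURCE A (Python) =====
-- def getMarks(s):
--     res=[]
--     for ind,ch in enumerate(s):
--         if(ch=='"'):
--             res.append(ind)
--     if(len(res)%2==1):
--         exit("falta \"")
--     return res[:2]
-- ===== SOURCE B (Python) =====
-- def getMarks(s):
--     total = sum(1 for ch in s if ch == '"')
--     if total % 2 == 1:
--         exit('falta "')
--     res = []
--     for ind, ch in enumerate(s):
--         if ch == '"':
--             res.append(ind)
--             if len(res) == 2:
--                 break
--     return res
-- ===== Notes on version B (the rewrite author's own statement) =====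
-- stated objective: alternative
-- what changed: B first counts all quotes in one pass to decide the odd-count error, then a second early-exiting scan collects only the first two quote indices and breaks, instead of A's single pass that materialises every quote index and slices [:2].
import Mathlib
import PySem

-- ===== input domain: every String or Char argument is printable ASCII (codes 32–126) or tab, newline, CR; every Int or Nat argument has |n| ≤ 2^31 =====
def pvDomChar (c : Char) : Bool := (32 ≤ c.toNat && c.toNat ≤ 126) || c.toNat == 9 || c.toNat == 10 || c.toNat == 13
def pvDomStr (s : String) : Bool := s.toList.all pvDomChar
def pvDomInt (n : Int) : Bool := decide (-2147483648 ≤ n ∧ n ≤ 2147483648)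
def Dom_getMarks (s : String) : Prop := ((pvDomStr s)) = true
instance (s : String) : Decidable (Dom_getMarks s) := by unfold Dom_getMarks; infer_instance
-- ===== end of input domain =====

-- B replaces A's collect-all-then-slice pass by a count pass plus an early-exiting scan for the first two quote indices (alternative decomposition, same cost).

-- ===== PORT A =====
def getMarks (s : String) : List Int :=
  let res := (PySem.List.enumerate s.toList 0).foldl
    (fun r (p : Int × Char) => if p.2 = '"' then r ++ [p.1] else r) ([] : List Int)
  PySem.List.slice res (some 0) (some 2)

-- ===== PORT B =====
-- early-exiting scan: append each quote index, stop as soon as two are collected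
def gmScan : List Char → Int → List Int → List Int
  | [], _, acc => acc
  | c :: t, i, acc =>
    if c = '"' then
      let acc' := acc ++ [i]
      if acc'.length = 2 then acc' else gmScan t (i + 1) acc'
    else gmScan t (i + 1) acc

def getMarks_alt (s : String) : List Int := gmScan s.toList 0 []

-- ===== PRECONDITION & SPEC =====
-- Pre_ excludes strings with an odd number of '"', on which Python A (and B) call exit("falta \"") (SystemExit) instead of returning.
def Pre_getMarks (s : String) : Prop := s.toList.count '"' % 2 = 0
instance (s : String) : Decidable (Pre_getMarks s) := by unfold Pre_getMarks; infer_instance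
def pvWitness_getMarks : String := "a\"b\"c"
def Spec_getMarks (s : String) (out : List Int) : Prop := out = getMarks_alt s
instance (s : String) (out : List Int) : Decidable (Spec_getMarks s out) := by unfold Spec_getMarks; infer_instance

-- ===== CLAIM (what is proved, stated in full; the proofs are below) =====
def Claim_equal_getMarks : Prop := ∀ (s : String), Dom_getMarks s → Pre_getMarks s → Spec_getMarks s (getMarks s)

-- ===== LEMMAS AND PROOFS =====

-- the list of all quote indices starting at offset i
def qIdx : List Char → Int → List Int
  | [], _ => []
  | c :: t, i => if c = '"' then i :: qIdx t (i + 1) else qIdx t (i + 1)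

theorem foldl_enum_eq_qIdx (l : List Char) (i : Int) (acc : List Int) :
    (PySem.List.enumerate l i).foldl
      (fun r (p : Int × Char) => if p.2 = '"' then r ++ [p.1] else r) acc
      = acc ++ qIdx l i := by
  induction l generalizing i acc with
  | nil => simp [PySem.List.enumerate_nil, qIdx]
  | cons c t ih =>
    simp only [PySem.List.enumerate_cons, List.foldl_cons, qIdx]
    by_cases h : c = '"' <;> simp [h, ih]

theorem gmScan_eq_take (l : List Char) (i : Int) (acc : List Int) (h : acc.length ≤ 1) :
    gmScan l i acc = (acc ++ qIdx l i).take 2 := by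
  induction l generalizing i acc with
  | nil =>
    simp [gmScan, qIdx, List.take_of_length_le (by omega : acc.length ≤ 2)]
  | cons c t ih =>
    by_cases hc : c = '"'
    · simp only [gmScan, hc, if_pos rfl, qIdx, if_true]
      by_cases h2 : (acc ++ [i]).length = 2
      · rw [if_pos h2]
        have : acc ++ i :: qIdx t (i + 1) = (acc ++ [i]) ++ qIdx t (i + 1) := by simp
        rw [this, ← h2, List.take_left]
      · rw [if_neg h2,
          ih (i + 1) (acc ++ [i])
            (by simp only [List.length_append, List.length_cons, List.length_nil] at h2 ⊢; omega)]
        simp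
    · simp only [gmScan, hc, if_neg hc, qIdx]
      exact ih _ _ h

theorem getMarks_eq (s : String) : getMarks s = getMarks_alt s := by
  unfold getMarks getMarks_alt
  rw [foldl_enum_eq_qIdx, gmScan_eq_take _ _ _ (by simp),
    PySem.List.slice_zero_start]
  simp [PySem.List.slice_to]

-- ===== VERDICT (by name: the statement is the Claim_ definition above) =====
theorem getMarks_spec : Claim_equal_getMarks := by
  intro s _ _
  exact getMarks_eq s
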